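-- pv_equiv track=rewrite | github.com/Guanghan/arc-witness-envs | converters/validate.py | _compute_yellow_path
-- ===== SOURCE A (Python) =====
-- def _compute_yellow_path(blue_path, yellow_start, sym, cols, rows):
--     """Compute yellow path from blue path."""
--     y_path = [yellow_start]
--     for i in range(1, len(blue_path)):
--         bc, br = blue_path[i]
--         pc, pr = blue_path[i - 1]
--         dc, dr = bc - pc, br - pr
--         if sym == "horizontal":
--             ydc, ydr = -dc, dr
--         elif sym == "vertical":
--             ydc, ydr = dc, -dr
--         elif sym == "rotational":
--             ydc, ydr = -dc, -dr
--         else: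
--             ydc, ydr = dc, dr
--         last = y_path[-1]
--         y_path.append((last[0] + ydc, last[1] + ydr))
--     return y_path
-- ===== SOURCE B (Python) =====
-- def _compute_yellow_path(blue_path, yellow_start, sym, cols, rows):
--     """Compute yellow path from blue path (closed-form offsets from the start)."""
--     if len(blue_path) < 2:
--         return [yellow_start]
--     sc, sr = {"horizontal": (-1, 1), "vertical": (1, -1), "rotational": (-1, -1)}.get(sym, (1, 1))
--     yc, yr = yellow_start
--     bc0, br0 = blue_path[0]
--     return [yellow_start] + [(yc + sc * (bc - bc0), yr + sr * (br - br0))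
--                              for bc, br in blue_path[1:]]
-- ===== Notes on version B (the rewrite author's own statement) =====
-- stated objective: simpler
-- what changed: Replaces the sequential accumulator (each point built from the previous yellow point and the previous blue delta) by a direct closed-form comprehension: each yellow point is yellow_start plus a per-axis sign times the offset of the blue point from blue_path[0].
import Mathlib
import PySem

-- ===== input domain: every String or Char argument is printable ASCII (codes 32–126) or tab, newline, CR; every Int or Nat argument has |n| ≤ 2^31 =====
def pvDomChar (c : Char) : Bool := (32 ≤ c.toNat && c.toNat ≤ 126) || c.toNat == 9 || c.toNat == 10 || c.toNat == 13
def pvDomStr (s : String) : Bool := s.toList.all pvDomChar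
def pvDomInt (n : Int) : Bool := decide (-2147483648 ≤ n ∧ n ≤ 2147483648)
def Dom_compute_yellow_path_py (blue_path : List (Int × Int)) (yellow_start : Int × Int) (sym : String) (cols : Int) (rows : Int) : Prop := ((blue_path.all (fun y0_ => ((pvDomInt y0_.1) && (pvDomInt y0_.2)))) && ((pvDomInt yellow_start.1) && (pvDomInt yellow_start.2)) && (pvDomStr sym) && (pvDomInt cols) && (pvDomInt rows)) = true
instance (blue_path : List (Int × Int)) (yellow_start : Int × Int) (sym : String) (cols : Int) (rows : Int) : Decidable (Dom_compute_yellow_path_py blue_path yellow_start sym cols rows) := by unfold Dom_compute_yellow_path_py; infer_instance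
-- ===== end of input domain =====

-- B replaces A's running accumulator (previous yellow point + mirrored blue delta) by a
-- closed-form per-point offset from the start; objective: simpler.

-- ===== PORT A =====
-- loop body of A's 'for i in range(1, len(blue_path))' (pyGetD is exact: i and i-1 are in range)
def pvStepA (blue_path : List (Int × Int)) (sym : String) (y_path : List (Int × Int)) (i : Int) : List (Int × Int) :=
  let b := PySem.List.pyGetD blue_path i (0, 0)
  let p := PySem.List.pyGetD blue_path (i - 1) (0, 0)
  let dc := b.1 - p.1
  let dr := b.2 - p.2
  let yd : Int × Int :=
    if sym == "horizontal" then (-dc, dr)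
    else if sym == "vertical" then (dc, -dr)
    else if sym == "rotational" then (-dc, -dr)
    else (dc, dr)
  let last := PySem.List.pyGetD y_path (-1) (0, 0)
  y_path ++ [(last.1 + yd.1, last.2 + yd.2)]

def compute_yellow_path_py (blue_path : List (Int × Int)) (yellow_start : Int × Int) (sym : String) (cols : Int) (rows : Int) : List (Int × Int) :=
  (PySem.List.pyRange 1 (blue_path.length : Int)).foldl (pvStepA blue_path sym) [yellow_start]

-- ===== PORT B =====
def compute_yellow_path_py_alt (blue_path : List (Int × Int)) (yellow_start : Int × Int) (sym : String) (cols : Int) (rows : Int) : List (Int × Int) :=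
  if blue_path.length < 2 then [yellow_start]
  else
    let s : Int × Int :=
      if sym == "horizontal" then (-1, 1)
      else if sym == "vertical" then (1, -1)
      else if sym == "rotational" then (-1, -1)
      else (1, 1)
    let b0 := PySem.List.pyGetD blue_path 0 (0, 0)
    [yellow_start] ++
      (PySem.List.slice blue_path (some 1) none).map
        (fun b => (yellow_start.1 + s.1 * (b.1 - b0.1), yellow_start.2 + s.2 * (b.2 - b0.2)))

-- ===== PRECONDITION & SPEC =====
def Spec_compute_yellow_path_py (blue_path : List (Int × Int)) (yellow_start : Int × Int) (sym : String) (cols : Int) (rows : Int) (out : List (Int × Int)) : Prop := out = compute_yellow_path_py_alt blue_path yellow_start sym cols rows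
instance (blue_path : List (Int × Int)) (yellow_start : Int × Int) (sym : String) (cols : Int) (rows : Int) (out : List (Int × Int)) : Decidable (Spec_compute_yellow_path_py blue_path yellow_start sym cols rows out) := by unfold Spec_compute_yellow_path_py; infer_instance

-- ===== CLAIM (what is proved, stated in full; the proofs are below) =====
def Claim_equal_compute_yellow_path_py : Prop := ∀ (blue_path : List (Int × Int)) (yellow_start : Int × Int) (sym : String) (cols : Int) (rows : Int), Dom_compute_yellow_path_py blue_path yellow_start sym cols rows → Spec_compute_yellow_path_py blue_path yellow_start sym cols rows (compute_yellow_path_py blue_path yellow_start sym cols rows)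

-- ===== LEMMAS AND PROOFS =====

-- B's per-axis sign pair
def pvSign (sym : String) : Int × Int :=
  if sym == "horizontal" then (-1, 1)
  else if sym == "vertical" then (1, -1)
  else if sym == "rotational" then (-1, -1)
  else (1, 1)

-- A's branch cascade computes exactly (s.1 * dc, s.2 * dr)
theorem pvStepA_yd (sym : String) (dc dr : Int) :
    (if sym == "horizontal" then (-dc, dr)
     else if sym == "vertical" then (dc, -dr)
     else if sym == "rotational" then (-dc, -dr)
     else (dc, dr)) = ((pvSign sym).1 * dc, (pvSign sym).2 * dr) := by
  unfold pvSign
  split_ifs <;> simp <;> ring_nf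

-- B's closed-form point
def pvF (bp : List (Int × Int)) (ys : Int × Int) (sym : String) (b : Int × Int) : Int × Int :=
  (ys.1 + (pvSign sym).1 * (b.1 - (PySem.List.pyGetD bp 0 (0, 0)).1),
   ys.2 + (pvSign sym).2 * (b.2 - (PySem.List.pyGetD bp 0 (0, 0)).2))

theorem pvF_zero (bp : List (Int × Int)) (ys : Int × Int) (sym : String) (h : 0 < bp.length) :
    pvF bp ys sym (bp[0]) = ys := by
  unfold pvF
  have : PySem.List.pyGetD bp 0 (0, 0) = bp[0] := by
    have := PySem.List.pyGetD_natCast bp 0 ((0 : Int), (0 : Int))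
    simpa [List.getD, List.getElem?_eq_getElem h] using this
  rw [this]; ring_nf

-- loop invariant: after processing indices 1..n, y_path is the map of pvF over the first n+1 blue points
theorem pvInv (bp : List (Int × Int)) (ys : Int × Int) (sym : String) :
    ∀ n : Nat, n < bp.length →
      (PySem.List.pyRange 1 ((n : Int) + 1)).foldl (pvStepA bp sym) [ys]
        = (bp.take (n + 1)).map (pvF bp ys sym) := by
  intro n
  induction n with
  | zero =>
    intro h
    simp only [Nat.cast_zero, zero_add]
    rw [show PySem.List.pyRange 1 1 = [] from by decide]
    simp [List.take_succ, List.getElem?_eq_getElem h, pvF_zero bp ys sym h]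
  | succ n ih =>
    intro h
    have hn : n < bp.length := Nat.lt_of_succ_lt h
    have hrange : PySem.List.pyRange 1 (((n + 1 : Nat) : Int) + 1)
        = PySem.List.pyRange 1 ((n : Int) + 1) ++ [(n : Int) + 1] := by
      push_cast
      exact PySem.List.pyRange_one_succ_right (by omega)
    rw [hrange, List.foldl_append, ih hn, List.foldl_cons, List.foldl_nil]
    have hlenacc : ((bp.take (n + 1)).map (pvF bp ys sym)).length = n + 1 := by
      simp [List.length_take]
      omega
    have hb : PySem.List.pyGetD bp ((n : Int) + 1) (0, 0) = bp[n + 1] := by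
      have := PySem.List.pyGetD_natCast bp (n + 1) ((0 : Int), (0 : Int))
      push_cast at this
      simpa [List.getD, List.getElem?_eq_getElem h] using this
    have hp : PySem.List.pyGetD bp ((n : Int) + 1 - 1) (0, 0) = bp[n] := by
      have := PySem.List.pyGetD_natCast bp n ((0 : Int), (0 : Int))
      simpa [List.getD, List.getElem?_eq_getElem hn, add_sub_cancel_right] using this
    have hlast : PySem.List.pyGetD ((bp.take (n + 1)).map (pvF bp ys sym)) (-1) (0, 0)
        = pvF bp ys sym (bp[n]) := by
      rw [PySem.List.pyGetD_neg_ofNat _ 1 (0, 0) (by omega) (by omega)]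
      simp only [hlenacc, Nat.add_sub_cancel]
      simp [List.getElem_take]
    have htake : bp.take (n + 1 + 1) = bp.take (n + 1) ++ [bp[n + 1]] := by
      rw [List.take_succ, List.getElem?_eq_getElem h]
      rfl
    simp only [pvStepA]
    rw [hb, hp, pvStepA_yd, hlast, htake, List.map_append]
    simp only [List.map_cons, List.map_nil, List.append_cancel_left_eq]
    unfold pvF
    simp only [List.cons.injEq, Prod.mk.injEq, and_true]
    constructor <;> ring

theorem pvMain (bp : List (Int × Int)) (ys : Int × Int) (sym : String) (cols rows : Int) :
    compute_yellow_path_py bp ys sym cols rows = compute_yellow_path_py_alt bp ys sym cols rows := by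
  unfold compute_yellow_path_py compute_yellow_path_py_alt
  by_cases hlen : bp.length < 2
  · -- 0 or 1 points: the loop range is empty
    have hempty : PySem.List.pyRange 1 (bp.length : Int) = [] := by
      interval_cases h : bp.length <;> decide
    rw [hempty]
    simp [hlen]
  · have h2 : 2 ≤ bp.length := Nat.le_of_not_lt hlen
    have hn : bp.length - 1 < bp.length := by omega
    have hcast : (bp.length : Int) = ((bp.length - 1 : Nat) : Int) + 1 := by
      push_cast [Nat.cast_sub (by omega : 1 ≤ bp.length)]; ring
    rw [hcast, pvInv bp ys sym (bp.length - 1) hn]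
    have htake : bp.take (bp.length - 1 + 1) = bp := by
      rw [Nat.sub_add_cancel (by omega)]; exact List.take_length
    rw [htake]
    simp only [if_neg hlen, PySem.List.slice_from_one]
    -- bp.map f = f bp[0] :: bp.tail.map f, and f bp[0] = ys
    obtain ⟨b0, rest, rfl⟩ : ∃ b0 rest, bp = b0 :: rest := by
      cases bp with
      | nil => simp at h2
      | cons a l => exact ⟨a, l, rfl⟩
    have h0 : pvF (b0 :: rest) ys sym ((b0 :: rest)[0]) = ys := pvF_zero _ ys sym (by simp)
    simp only [List.map_cons, List.tail_cons]
    rw [show (b0 :: rest)[0] = b0 from rfl] at h0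
    rw [h0]
    rfl

-- ===== VERDICT (by name: the statement is the Claim_ definition above) =====
theorem compute_yellow_path_py_spec : Claim_equal_compute_yellow_path_py := by
  intro bp ys sym cols rows _
  unfold Spec_compute_yellow_path_py
  exact pvMain bp ys sym cols rows
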